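-- pv_equiv track=rewrite | github.com/yangfcm/algorithm-python | algo/array/triple_sum.py | solution
-- ===== SOURCE A (Python) =====
-- def solution(a, b, c):
--   a = sorted(list(set(a)), reverse=True)
--   b = sorted(list(set(b)), reverse=True)
--   c = sorted(list(set(c)), reverse=True)
--
--   count = 0
--   ai = 0
--   ci = 0
--   for bn in b:
--     while ai < len(a):
--       if a[ai] <= bn: break # The first element from a is less than a particular number from b.
--       # So we can stop the loop here, because the remaining must less than bn.
--       ai+=1
--
--     while ci < len(c):  # Same logic as above.
--       if c[ci] <= bn: break;
--       ci+=1
--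
--     count += (len(a) - ai) * (len(c) - ci)
--
--   return count
-- ===== SOURCE B (Python) =====
-- def solution(a, b, c):
--   sa = set(a)
--   sc = set(c)
--   return sum(
--     sum(1 for x in sa if x <= bn) * sum(1 for y in sc if y <= bn)
--     for bn in set(b)
--   )
-- ===== Notes on version B (the rewrite author's own statement) =====
-- stated objective: simpler
-- what changed: Replaces the three sorts and the stateful two-pointer sweep over descending lists with a direct sum over distinct b-values of (#distinct a-values <= bn) * (#distinct c-values <= bn), with no sorting and no pointer state.
import Mathlib
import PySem

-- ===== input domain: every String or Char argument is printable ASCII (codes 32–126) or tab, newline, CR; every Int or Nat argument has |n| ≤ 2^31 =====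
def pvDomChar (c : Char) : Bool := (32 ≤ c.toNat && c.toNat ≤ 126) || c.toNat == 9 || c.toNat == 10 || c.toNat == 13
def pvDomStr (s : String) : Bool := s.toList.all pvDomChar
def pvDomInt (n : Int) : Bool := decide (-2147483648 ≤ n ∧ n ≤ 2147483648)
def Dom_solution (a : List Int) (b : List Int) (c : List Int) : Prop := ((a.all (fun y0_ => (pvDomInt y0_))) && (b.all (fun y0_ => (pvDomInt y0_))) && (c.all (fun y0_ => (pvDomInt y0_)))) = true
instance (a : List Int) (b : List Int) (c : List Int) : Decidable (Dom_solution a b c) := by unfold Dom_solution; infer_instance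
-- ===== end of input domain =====

-- B replaces A's three sorts and stateful two-pointer sweep with a direct sum over
-- distinct b-values of (#distinct a ≤ bn) * (#distinct c ≤ bn) — simpler, same results.

-- ===== PORT A =====
-- inner 'while ai < len(a): if a[ai] <= bn: break; ai += 1'
def pvAdv (l : List Int) (bn : Int) (i : Nat) : Nat :=
  if h : i < l.length then
    if l[i] ≤ bn then i else pvAdv l bn (i + 1)
  else i
termination_by l.length - i

-- 'for bn in b' loop carrying (count, ai, ci)
def pvLoopA (aL cL : List Int) : List Int → Int → Nat → Nat → Int
  | [], count, _, _ => count
  | bn :: bs, count, ai, ci =>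
    let ai' := pvAdv aL bn ai
    let ci' := pvAdv cL bn ci
    pvLoopA aL cL bs (count + ((aL.length - ai' : Nat) : Int) * ((cL.length - ci' : Nat) : Int)) ai' ci'

def solution (a : List Int) (b : List Int) (c : List Int) : Int :=
  let a' := PySem.List.sorted (PySem.Set.ofList a) (fun x => x) true
  let b' := PySem.List.sorted (PySem.Set.ofList b) (fun x => x) true
  let c' := PySem.List.sorted (PySem.Set.ofList c) (fun x => x) true
  pvLoopA a' c' b' 0 0 0

-- ===== PORT B =====
def solution_alt (a : List Int) (b : List Int) (c : List Int) : Int :=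
  let sa := PySem.Set.ofList a
  let sc := PySem.Set.ofList c
  (PySem.Set.ofList b).foldl
    (fun acc bn =>
      acc + ((sa.countP (fun x => decide (x ≤ bn)) : Nat) : Int)
              * ((sc.countP (fun y => decide (y ≤ bn)) : Nat) : Int)) 0

-- ===== PRECONDITION & SPEC =====
def Spec_solution (a : List Int) (b : List Int) (c : List Int) (out : Int) : Prop := out = solution_alt a b c
instance (a : List Int) (b : List Int) (c : List Int) (out : Int) : Decidable (Spec_solution a b c out) := by unfold Spec_solution; infer_instance

-- ===== CLAIM (what is proved, stated in full; the proofs are below) =====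
def Claim_equal_solution : Prop := ∀ (a : List Int) (b : List Int) (c : List Int), Dom_solution a b c → Spec_solution a b c (solution a b c)

-- ===== LEMMAS AND PROOFS =====

theorem pvAdv_le (l : List Int) (bn : Int) (i : Nat) (h : i ≤ l.length) :
    pvAdv l bn i ≤ l.length := by
  fun_induction pvAdv l bn i <;> omega

theorem pvAdv_prefix (l : List Int) (bn : Int) (i : Nat) :
    (∀ j (hj : j < l.length), j < i → bn < l[j]) →
    ∀ j (hj : j < l.length), j < pvAdv l bn i → bn < l[j] := by
  fun_induction pvAdv l bn i with
  | case1 i h hle => exact fun hpre => hpre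
  | case2 i h hgt ih =>
    intro hpre
    apply ih
    intro j hj hji
    rcases Nat.lt_succ_iff_lt_or_eq.mp hji with h' | h'
    · exact hpre j hj h'
    · subst h'; omega
  | case3 i h => exact fun hpre => hpre

theorem pvAdv_hit (l : List Int) (bn : Int) (i : Nat)
    (h : pvAdv l bn i < l.length) : l[pvAdv l bn i] ≤ bn := by
  fun_induction pvAdv l bn i with
  | case1 i h' hle => exact hle
  | case2 i h' hgt ih => exact ih h
  | case3 i h' => omega

theorem pvAdv_countP (l : List Int) (bn : Int) (i : Nat)
    (hd : l.Pairwise (· > ·))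
    (hpre : ∀ j (hj : j < l.length), j < i → bn < l[j])
    (hle : i ≤ l.length) :
    l.countP (fun x => decide (x ≤ bn)) = l.length - pvAdv l bn i := by
  set k := pvAdv l bn i with hk
  have hkle : k ≤ l.length := pvAdv_le l bn i hle
  have hpk : ∀ j (hj : j < l.length), j < k → bn < l[j] := pvAdv_prefix l bn i hpre
  have hpw := List.pairwise_iff_getElem.mp hd
  have hsplit : l = l.take k ++ l.drop k := (List.take_append_drop k l).symm
  have h1 : (l.take k).countP (fun x => decide (x ≤ bn)) = 0 := by
    rw [List.countP_eq_zero]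
    intro x hx
    rw [List.mem_iff_getElem] at hx
    obtain ⟨j, hj, hxj⟩ := hx
    have hj' : j < k ∧ j < l.length := by
      simp only [List.length_take] at hj; omega
    have hbl : bn < l[j]'hj'.2 := hpk j hj'.2 hj'.1
    have hxx : x = l[j]'hj'.2 := by simpa using hxj.symm
    simp only [decide_eq_true_eq]
    omega
  have h2 : (l.drop k).countP (fun x => decide (x ≤ bn)) = (l.drop k).length := by
    rw [List.countP_eq_length]
    intro x hx
    rw [List.mem_iff_getElem] at hx
    obtain ⟨j, hj, hxj⟩ := hx
    have hjlen : k + j < l.length := by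
      simp only [List.length_drop] at hj; omega
    have hklen : k < l.length := by omega
    have hxval : x = l[k + j]'hjlen := by simpa using hxj.symm
    have hkv : l[k]'hklen ≤ bn := by
      have := pvAdv_hit l bn i (hk ▸ hklen)
      simpa [← hk] using this
    simp only [decide_eq_true_eq]
    rcases Nat.eq_zero_or_pos j with h0 | h0
    · subst h0; simp only [Nat.add_zero] at hxval; omega
    · have := hpw k (k + j) hklen hjlen (by omega)
      omega
  calc l.countP (fun x => decide (x ≤ bn))
      = (l.take k ++ l.drop k).countP (fun x => decide (x ≤ bn)) := by rw [← hsplit]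
    _ = l.length - k := by
        rw [List.countP_append, h1, h2]
        simp [List.length_drop]

theorem pvLoopA_eq (aL cL : List Int) (bs : List Int) (count : Int) (ai ci : Nat)
    (hda : aL.Pairwise (· > ·)) (hdc : cL.Pairwise (· > ·))
    (hdb : bs.Pairwise (· > ·))
    (hia : ai ≤ aL.length) (hic : ci ≤ cL.length)
    (hpa : ∀ bn ∈ bs, ∀ j (hj : j < aL.length), j < ai → bn < aL[j])
    (hpc : ∀ bn ∈ bs, ∀ j (hj : j < cL.length), j < ci → bn < cL[j]) :
    pvLoopA aL cL bs count ai ci =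
      count + (bs.map (fun bn =>
        ((aL.countP (fun x => decide (x ≤ bn)) : Nat) : Int)
          * ((cL.countP (fun y => decide (y ≤ bn)) : Nat) : Int))).sum := by
  induction bs generalizing count ai ci with
  | nil => simp [pvLoopA]
  | cons bn bs ih =>
    rw [pvLoopA]
    have hca := pvAdv_countP aL bn ai hda (hpa bn (by simp)) hia
    have hcc := pvAdv_countP cL bn ci hdc (hpc bn (by simp)) hic
    have hpa' := pvAdv_prefix aL bn ai (hpa bn (by simp))
    have hpc' := pvAdv_prefix cL bn ci (hpc bn (by simp))
    have hbgt : ∀ bn' ∈ bs, bn' < bn := fun bn' hbn' =>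
      List.rel_of_pairwise_cons hdb hbn'
    rw [ih _ _ _ (List.Pairwise.of_cons hdb)
        (pvAdv_le aL bn ai hia) (pvAdv_le cL bn ci hic)
        (fun bn' hbn' j hj hji => lt_trans (hbgt bn' hbn') (hpa' j hj hji))
        (fun bn' hbn' j hj hji => lt_trans (hbgt bn' hbn') (hpc' j hj hji))]
    simp only [List.map_cons, List.sum_cons, ← hca, ← hcc]
    ring

theorem pairwise_gt_of_sorted_rev_ofList (xs : List Int) :
    (PySem.List.sorted (PySem.Set.ofList xs) (fun x => x) true).Pairwise (· > ·) := by
  have hp : (PySem.List.sorted (PySem.Set.ofList xs) (fun x => x) true).Perm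
      (PySem.Set.ofList xs) := PySem.List.sorted_perm _ _ _
  have h1 : (PySem.List.sorted (PySem.Set.ofList xs) (fun x => x) true).Pairwise
      (fun a b => (b : Int) ≤ a) := PySem.List.sorted_pairwise_rev _ _
  have h2 : (PySem.List.sorted (PySem.Set.ofList xs) (fun x => x) true).Pairwise
      (fun a b => (a : Int) ≠ b) := hp.symm.nodup (PySem.Set.nodup_ofList xs)
  exact (h1.and h2).imp (fun {a b} h => lt_of_le_of_ne h.1 (Ne.symm h.2))

-- ===== VERDICT (by name: the statement is the Claim_ definition above) =====
theorem solution_spec : Claim_equal_solution := by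
  unfold Claim_equal_solution
  intro a b c _
  unfold Spec_solution
  simp only [solution, solution_alt]
  rw [pvLoopA_eq _ _ _ _ _ _
      (pairwise_gt_of_sorted_rev_ofList a) (pairwise_gt_of_sorted_rev_ofList c)
      (pairwise_gt_of_sorted_rev_ofList b)
      (Nat.zero_le _) (Nat.zero_le _)
      (by intro bn _ j hj hji; omega) (by intro bn _ j hj hji; omega)]
  rw [PySem.List.foldl_add]
  have hcnt : ∀ (xs : List Int) (bn : Int),
      (PySem.List.sorted (PySem.Set.ofList xs) (fun x => x) true).countP
        (fun x => decide (x ≤ bn)) =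
      (PySem.Set.ofList xs).countP (fun x => decide (x ≤ bn)) := fun xs bn =>
    (PySem.List.sorted_perm (PySem.Set.ofList xs) (fun x => x) true).countP_eq _
  simp only [hcnt]
  have hpb : (PySem.List.sorted (PySem.Set.ofList b) (fun x => x) true).Perm
      (PySem.Set.ofList b) := PySem.List.sorted_perm _ _ _
  rw [(hpb.map _).sum_eq]
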